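-- pv_equiv track=rewrite | github.com/Gunact2910/Driver | keyboard_dashboard.py | parse_status_output
-- ===== SOURCE A (Python) =====
-- def parse_status_output(raw_output: str) -> list[dict[str, str]]:
--     devices: list[dict[str, str]] = []
--     current: dict[str, str] = {}
--
--     for line in raw_output.splitlines():
--         line = line.strip()
--         if not line:
--             if current:
--                 devices.append(current)
--                 current = {}
--             continue
--         if line.startswith("Interface :"):
--             current["interface"] = line.split(":", 1)[1].strip()
--         elif line.startswith("USB device :"):
--             current["usb_device"] = line.split(":", 1)[1].strip()
--         elif line.startswith("Vendor:Prod:"):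
--             current["vendor_product"] = line.split(":", 1)[1].strip()
--         elif line.startswith("Device    :"):
--             current["device"] = line.split(":", 1)[1].strip()
--         elif line.startswith("Driver    :"):
--             current["driver"] = line.split(":", 1)[1].strip()
--
--     if current:
--         devices.append(current)
--
--     normalized_devices = []
--     for device in devices:
--         normalized_devices.append({
--             "interface": device.get("interface", ""),
--             "device": device.get("device", ""),
--             "vendor_product": device.get("vendor_product", ""),
--             "driver": device.get("driver", ""),
--         })
--     return normalized_devices
-- ===== SOURCE B (Python) =====
-- _PREFIX_KEYS = [
--     ("Interface :", "interface"),
--     ("USB device :", "usb_device"),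
--     ("Vendor:Prod:", "vendor_product"),
--     ("Device    :", "device"),
--     ("Driver    :", "driver"),
-- ]
--
--
-- def parse_status_output(raw_output: str) -> list[dict[str, str]]:
--     # Segment-then-parse pipeline: split the lines into blank-separated blocks,
--     # then parse each block independently, keeping only blocks with a known field.
--     blocks: list[list[str]] = []
--     current_block: list[str] = []
--     for line in raw_output.splitlines():
--         stripped = line.strip()
--         if stripped:
--             current_block.append(stripped)
--         else:
--             blocks.append(current_block)
--             current_block = []
--     blocks.append(current_block)
--
--     result: list[dict[str, str]] = []
--     for block in blocks:
--         fields: dict[str, str] = {}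
--         for stripped in block:
--             for prefix, key in _PREFIX_KEYS:
--                 if stripped.startswith(prefix):
--                     fields[key] = stripped.split(":", 1)[1].strip()
--                     break
--         if fields:
--             result.append({
--                 "interface": fields.get("interface", ""),
--                 "device": fields.get("device", ""),
--                 "vendor_product": fields.get("vendor_product", ""),
--                 "driver": fields.get("driver", ""),
--             })
--     return result
-- ===== Notes on version B (the rewrite author's own statement) =====
-- stated objective: alternative
-- what changed: Replaces A's fused single-pass state machine (devices list + mutable current dict flushed on blank lines, then a normalization pass) with a segment-then-parse pipeline: first split the stripped lines into blank-separated blocks, then parse each block independently via a prefix table with an inner break loop, emitting a normalized record only for blocks whose parse is non-empty.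
import Mathlib
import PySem

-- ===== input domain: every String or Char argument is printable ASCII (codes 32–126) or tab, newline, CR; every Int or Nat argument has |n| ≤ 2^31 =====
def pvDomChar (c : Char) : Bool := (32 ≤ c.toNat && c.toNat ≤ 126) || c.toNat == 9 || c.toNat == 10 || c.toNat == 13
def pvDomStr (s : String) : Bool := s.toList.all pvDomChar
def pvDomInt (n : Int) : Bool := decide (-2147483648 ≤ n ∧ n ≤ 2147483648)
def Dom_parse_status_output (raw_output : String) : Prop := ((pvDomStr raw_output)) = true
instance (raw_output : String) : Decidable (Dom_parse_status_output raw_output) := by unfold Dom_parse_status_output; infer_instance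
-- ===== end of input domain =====

-- B replaces A's fused state machine by a segment-then-parse pipeline (split lines into
-- blank-separated blocks, then parse each block); objective: alternative decomposition.

-- ===== PORT A =====

-- line.split(":", 1)[1].strip()  (only evaluated under a startswith guard that guarantees a colon)
def pvVal (l : String) : String :=
  PySem.Str.strip (((PySem.Str.splitMax? l ":" 1).getD []).getD 1 "")

-- the elif chain of A's loop body on a non-blank stripped line
def pvAssign (cur : PySem.Dict String String) (l : String) : PySem.Dict String String :=
  if PySem.Str.startswith l "Interface :" then cur.insert "interface" (pvVal l)
  else if PySem.Str.startswith l "USB device :" then cur.insert "usb_device" (pvVal l)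
  else if PySem.Str.startswith l "Vendor:Prod:" then cur.insert "vendor_product" (pvVal l)
  else if PySem.Str.startswith l "Device    :" then cur.insert "device" (pvVal l)
  else if PySem.Str.startswith l "Driver    :" then cur.insert "driver" (pvVal l)
  else cur

def pvAStep (st : List (PySem.Dict String String) × PySem.Dict String String) (line : String) :
    List (PySem.Dict String String) × PySem.Dict String String :=
  let l := PySem.Str.strip line
  if l = "" then
    if st.2.items ≠ [] then (st.1 ++ [st.2], PySem.Dict.empty) else st
  else (st.1, pvAssign st.2 l)

-- the normalized dict A appends for each device (insertion order of the 4 fresh keys)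
def pvNorm (d : PySem.Dict String String) : List (String × String) :=
  [("interface", d.getD "interface" ""), ("device", d.getD "device" ""),
   ("vendor_product", d.getD "vendor_product" ""), ("driver", d.getD "driver" "")]

def parse_status_output (raw_output : String) : List (List (String × String)) :=
  let st := (PySem.Str.splitlines raw_output).foldl pvAStep ([], PySem.Dict.empty)
  let devices := if st.2.items ≠ [] then st.1 ++ [st.2] else st.1
  devices.foldl (fun acc d => acc ++ [pvNorm d]) []

-- ===== PORT B =====

def pvPrefixKeys : List (String × String) :=
  [("Interface :", "interface"), ("USB device :", "usb_device"),
   ("Vendor:Prod:", "vendor_product"), ("Device    :", "device"), ("Driver    :", "driver")]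

-- segmentation pass: accumulate stripped non-blank lines, emit a block at each blank line
def pvSegStep (st : List (List String) × List String) (line : String) :
    List (List String) × List String :=
  let s := PySem.Str.strip line
  if s ≠ "" then (st.1, st.2 ++ [s]) else (st.1 ++ [st.2], [])

-- inner for-with-break over the prefix table
def pvParseLine (fields : PySem.Dict String String) (s : String) : PySem.Dict String String :=
  match pvPrefixKeys.find? (fun pk => PySem.Str.startswith s pk.1) with
  | some pk => fields.insert pk.2 (pvVal s)
  | none => fields

def pvParseBlock (b : List String) : PySem.Dict String String :=
  b.foldl pvParseLine PySem.Dict.empty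

def pvEmit (acc : List (List (String × String))) (b : List String) :
    List (List (String × String)) :=
  let fields := pvParseBlock b
  if fields.items ≠ [] then acc ++ [pvNorm fields] else acc

def parse_status_output_alt (raw_output : String) : List (List (String × String)) :=
  let st := (PySem.Str.splitlines raw_output).foldl pvSegStep ([], [])
  (st.1 ++ [st.2]).foldl pvEmit []

-- ===== PRECONDITION & SPEC =====
def Spec_parse_status_output (raw_output : String) (out : List (List (String × String))) : Prop := out = parse_status_output_alt raw_output
instance (raw_output : String) (out : List (List (String × String))) : Decidable (Spec_parse_status_output raw_output out) := by unfold Spec_parse_status_output; infer_instance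

-- ===== CLAIM (what is proved, stated in full; the proofs are below) =====
def Claim_equal_parse_status_output : Prop := ∀ (raw_output : String), Dom_parse_status_output raw_output → Spec_parse_status_output raw_output (parse_status_output raw_output)

-- ===== LEMMAS AND PROOFS =====

-- devices A will have emitted after the remaining lines, starting from current dict `cur`
def pvGA : List String → PySem.Dict String String → List (PySem.Dict String String)
  | [], cur => if cur.items ≠ [] then [cur] else []
  | l :: ls, cur =>
    let s := PySem.Str.strip l
    if s = "" then
      if cur.items ≠ [] then cur :: pvGA ls PySem.Dict.empty else pvGA ls cur
    else pvGA ls (pvAssign cur s)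

-- blocks B will have produced from the remaining lines, with current partial block `bl`
def pvGB : List String → List String → List (List String)
  | [], bl => [bl]
  | l :: ls, bl =>
    let s := PySem.Str.strip l
    if s = "" then bl :: pvGB ls [] else pvGB ls (bl ++ [s])

theorem pvA_fold (ls : List String) (devs : List (PySem.Dict String String))
    (cur : PySem.Dict String String) :
    (let st := ls.foldl pvAStep (devs, cur)
     if st.2.items ≠ [] then st.1 ++ [st.2] else st.1) = devs ++ pvGA ls cur := by
  induction ls generalizing devs cur with
  | nil => simp [pvGA]; split <;> simp
  | cons l ls ih =>
    simp only [List.foldl_cons, pvGA]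
    by_cases hs : PySem.Str.strip l = ""
    · by_cases hc : cur.items ≠ [] <;>
        simp only [pvAStep, hs, hc, if_true, if_false, if_pos, if_neg, ite_true, ite_false,
          reduceIte, ne_eq, not_true, not_false_iff] <;>
        simp [hs, hc, ih, List.append_assoc]
    · simp only [pvAStep, hs, if_neg, reduceIte]
      simp [hs, ih]

theorem pvB_fold (ls : List String) (bs : List (List String)) (bl : List String) :
    (let st := ls.foldl pvSegStep (bs, bl); st.1 ++ [st.2]) = bs ++ pvGB ls bl := by
  induction ls generalizing bs bl with
  | nil => simp [pvGB]
  | cons l ls ih =>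
    simp only [List.foldl_cons, pvGB]
    by_cases hs : PySem.Str.strip l = "" <;>
      simp [pvSegStep, hs, ih, List.append_assoc]

theorem pvAssign_eq_parseLine (cur : PySem.Dict String String) (s : String) :
    pvParseLine cur s = pvAssign cur s := by
  by_cases h1 : PySem.Str.startswith s "Interface :" <;>
  by_cases h2 : PySem.Str.startswith s "USB device :" <;>
  by_cases h3 : PySem.Str.startswith s "Vendor:Prod:" <;>
  by_cases h4 : PySem.Str.startswith s "Device    :" <;>
  by_cases h5 : PySem.Str.startswith s "Driver    :" <;>
    (simp only [pvParseLine, pvPrefixKeys, List.find?, pvAssign, h1, h2, h3, h4, h5]; try rfl)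

theorem pvParseBlock_snoc (b : List String) (s : String) :
    pvParseBlock (b ++ [s]) = pvAssign (pvParseBlock b) s := by
  simp [pvParseBlock, List.foldl_append, pvAssign_eq_parseLine]

theorem pvEmpty_of_items_nil (d : PySem.Dict String String) (h : d.items = []) :
    d = PySem.Dict.empty := by
  apply PySem.Dict.ext; rw [h]; rfl

theorem pvEmit_foldl_acc (xs : List (List String)) (a : List (List (String × String))) :
    xs.foldl pvEmit a = a ++ xs.foldl pvEmit [] := by
  induction xs generalizing a with
  | nil => simp
  | cons x xs ihx =>
    simp only [List.foldl_cons]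
    rw [ihx, ihx (pvEmit [] x)]
    simp only [pvEmit]
    split <;> simp

theorem pvG_agree (ls : List String) (bl : List String) :
    (pvGB ls bl).foldl pvEmit []
      = (pvGA ls (pvParseBlock bl)).map pvNorm := by
  induction ls generalizing bl with
  | nil =>
    simp only [pvGB, pvGA, List.foldl]
    by_cases hc : (pvParseBlock bl).items ≠ [] <;> simp [pvEmit, hc]
  | cons l ls ih =>
    simp only [pvGB, pvGA]
    by_cases hs : PySem.Str.strip l = ""
    · simp only [hs, ite_true, if_pos, List.foldl_cons]
      by_cases hc : (pvParseBlock bl).items ≠ []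
      · have hemit : pvEmit [] bl = [pvNorm (pvParseBlock bl)] := by simp [pvEmit, hc]
        rw [if_pos hc, pvEmit_foldl_acc, hemit, ih [], List.map_cons]
        rfl
      · simp only [ne_eq, not_not] at hc
        have hbl : pvParseBlock bl = PySem.Dict.empty := pvEmpty_of_items_nil _ hc
        have hemit : pvEmit [] bl = [] := by simp [pvEmit, hc]
        rw [if_neg (not_not_intro hc), pvEmit_foldl_acc, hemit, ih [], hbl]
        rfl
    · simp only [hs, ite_false]
      rw [ih (bl ++ [PySem.Str.strip l]), pvParseBlock_snoc]

-- ===== VERDICT (by name: the statement is the Claim_ definition above) =====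
theorem parse_status_output_spec : Claim_equal_parse_status_output := by
  intro raw _
  show parse_status_output raw = parse_status_output_alt raw
  unfold parse_status_output parse_status_output_alt
  rw [PySem.List.foldl_append_singleton_eq_map]
  have hA := pvA_fold (PySem.Str.splitlines raw) [] PySem.Dict.empty
  have hB := pvB_fold (PySem.Str.splitlines raw) [] []
  simp only [List.nil_append] at hA hB
  rw [hA]
  simp only [hB]
  rw [pvG_agree]
  rfl
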